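-- pv_equiv track=rewrite | github.com/bhadraagada/battleship | ai.py | _placement_consistent_with_clusters
-- ===== SOURCE A (Python) =====
-- from typing import List, Tuple, Optional, Set
--
-- def _placement_consistent_with_clusters(
--
--     cells: List[Tuple[int, int]],
--     clusters: List[Tuple[Set[Tuple[int, int]], Optional[str]]],
--     length: int,
--     horizontal: bool,
-- ) -> bool:
--     # A ship placement can intersect at most one cluster, must fully cover it if it intersects,
--     # and must align with the cluster's orientation if known. It cannot intersect a cluster larger than itself.
--     intersected = 0
--     cells_set = set(cells)
--     for comp, orient in clusters:
--         inter = cells_set.intersection(comp)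
--         if not inter:
--             continue
--         # intersected something
--         if len(comp) > length:
--             return False
--         intersected += 1
--         # Must include all cells of the cluster
--         if not comp.issubset(cells_set):
--             return False
--         # Must align with cluster orientation if known
--         if orient == 'h' and not horizontal:
--             return False
--         if orient == 'v' and horizontal:
--             return False
--         if intersected > 1:
--             return False
--     return True
-- ===== SOURCE B (Python) =====
-- from typing import List, Tuple, Optional, Set
--
-- def _placement_consistent_with_clusters(
--     cells: List[Tuple[int, int]],
--     clusters: List[Tuple[Set[Tuple[int, int]], Optional[str]]],
--     length: int,
--     horizontal: bool,
-- ) -> bool: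
--     # Invert the traversal: for each placement cell, record which clusters it touches.
--     touched = set()
--     for cell in cells:
--         for i, (comp, _orient) in enumerate(clusters):
--             if cell in comp:
--                 touched.add(i)
--     if len(touched) > 1:
--         return False
--     if not touched:
--         return True
--     comp, orient = clusters[next(iter(touched))]
--     if len(comp) > length or not comp.issubset(set(cells)):
--         return False
--     if orient == 'h' and not horizontal:
--         return False
--     if orient == 'v' and horizontal:
--         return False
--     return True
-- ===== Notes on version B (the rewrite author's own statement) =====
-- stated objective: alternative
-- what changed: Inverts the traversal: instead of A's stateful scan over clusters with an intersected counter and early returns, B builds the set of cluster indices touched by any placement cell, returns True/False on its size, and judges the single touched cluster separately.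
import Mathlib
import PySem

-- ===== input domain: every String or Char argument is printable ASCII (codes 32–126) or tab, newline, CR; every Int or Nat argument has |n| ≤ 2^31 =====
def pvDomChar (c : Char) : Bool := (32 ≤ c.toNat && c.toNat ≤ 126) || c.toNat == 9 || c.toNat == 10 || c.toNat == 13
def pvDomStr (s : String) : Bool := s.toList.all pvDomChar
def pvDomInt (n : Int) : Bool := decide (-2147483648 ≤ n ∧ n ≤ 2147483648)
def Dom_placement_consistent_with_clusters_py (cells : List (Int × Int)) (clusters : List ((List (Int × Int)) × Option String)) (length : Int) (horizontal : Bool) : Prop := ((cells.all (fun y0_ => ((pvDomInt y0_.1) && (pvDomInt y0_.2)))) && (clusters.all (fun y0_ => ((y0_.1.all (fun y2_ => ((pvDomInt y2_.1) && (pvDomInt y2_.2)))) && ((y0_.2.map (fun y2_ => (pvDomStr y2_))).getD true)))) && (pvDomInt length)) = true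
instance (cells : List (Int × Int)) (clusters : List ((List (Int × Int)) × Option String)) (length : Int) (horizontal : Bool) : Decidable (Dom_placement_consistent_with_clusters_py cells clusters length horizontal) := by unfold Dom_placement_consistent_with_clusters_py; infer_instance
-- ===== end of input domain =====

-- B inverts the traversal: instead of A's stateful scan over clusters with early returns, it
-- indexes which clusters each placement cell touches, then judges the (at most one) touched cluster.

-- ===== PORT A =====
-- the `for comp, orient in clusters:` loop of A, with the running `intersected` counter
def pvAGo (cells_set : List (Int × Int)) (length : Int) (horizontal : Bool) :
    List ((List (Int × Int)) × Option String) → Int → Bool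
  | [], _ => true
  | (comp, orient) :: rest, intersected =>
    let inter := PySem.Set.inter cells_set comp
    if inter.isEmpty then pvAGo cells_set length horizontal rest intersected
    else if (comp.length : Int) > length then false
    else
      let intersected' := intersected + 1
      if !(PySem.Set.issubset comp cells_set) then false
      else if orient == some "h" && !horizontal then false
      else if orient == some "v" && horizontal then false
      else if intersected' > 1 then false
      else pvAGo cells_set length horizontal rest intersected'

def placement_consistent_with_clusters_py (cells : List (Int × Int)) (clusters : List ((List (Int × Int)) × Option String)) (length : Int) (horizontal : Bool) : Bool :=
  pvAGo (PySem.Set.ofList cells) length horizontal clusters 0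

-- ===== PORT B =====
def placement_consistent_with_clusters_py_alt (cells : List (Int × Int)) (clusters : List ((List (Int × Int)) × Option String)) (length : Int) (horizontal : Bool) : Bool :=
  let touched : PySem.Set Int :=
    cells.foldl (fun acc cell =>
      (PySem.List.enumerate clusters).foldl (fun acc2 icl =>
        if icl.2.1.contains cell then PySem.Set.add acc2 icl.1 else acc2) acc) []
  if touched.length > 1 then false
  else
    match touched with
    | [] => true
    | i :: _ =>
      match PySem.List.pyGet? clusters i with
      | none => false   -- unreachable: every i in touched indexes clusters
      | some (comp, orient) =>
        if (comp.length : Int) > length || !(PySem.Set.issubset comp (PySem.Set.ofList cells)) then false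
        else if orient == some "h" && !horizontal then false
        else if orient == some "v" && horizontal then false
        else true

-- ===== PRECONDITION & SPEC =====
def Spec_placement_consistent_with_clusters_py (cells : List (Int × Int)) (clusters : List ((List (Int × Int)) × Option String)) (length : Int) (horizontal : Bool) (out : Bool) : Prop := out = placement_consistent_with_clusters_py_alt cells clusters length horizontal
instance (cells : List (Int × Int)) (clusters : List ((List (Int × Int)) × Option String)) (length : Int) (horizontal : Bool) (out : Bool) : Decidable (Spec_placement_consistent_with_clusters_py cells clusters length horizontal out) := by unfold Spec_placement_consistent_with_clusters_py; infer_instance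

-- ===== CLAIM (what is proved, stated in full; the proofs are below) =====
def Claim_equal_placement_consistent_with_clusters_py : Prop := ∀ (cells : List (Int × Int)) (clusters : List ((List (Int × Int)) × Option String)) (length : Int) (horizontal : Bool), Dom_placement_consistent_with_clusters_py cells clusters length horizontal → Spec_placement_consistent_with_clusters_py cells clusters length horizontal (placement_consistent_with_clusters_py cells clusters length horizontal)

-- ===== LEMMAS AND PROOFS =====

-- a cluster intersects the placement
def pvHit (cells : List (Int × Int)) (cl : (List (Int × Int)) × Option String) : Bool :=
  cl.1.any (fun c => cells.contains c)

-- the per-cluster checks both programs perform on the single intersected cluster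
def pvOk (cells : List (Int × Int)) (length : Int) (horizontal : Bool)
    (cl : (List (Int × Int)) × Option String) : Bool :=
  if (cl.1.length : Int) > length then false
  else if !(PySem.Set.issubset cl.1 (PySem.Set.ofList cells)) then false
  else if cl.2 == some "h" && !horizontal then false
  else if cl.2 == some "v" && horizontal then false
  else true

lemma pvInter_isEmpty (cells : List (Int × Int)) (cl : (List (Int × Int)) × Option String) :
    (PySem.Set.inter (PySem.Set.ofList cells) cl.1).isEmpty = !(pvHit cells cl) := by
  simp only [PySem.Set.inter, pvHit]
  rw [Bool.eq_iff_iff]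
  simp [List.isEmpty_iff, List.filter_eq_nil_iff, PySem.Set.mem_ofList]
  aesop

-- A's loop once something has already been intersected: any further hit fails
lemma pvAGo_pos (cells : List (Int × Int)) (length : Int) (horizontal : Bool) :
    ∀ (cls : List ((List (Int × Int)) × Option String)) (k : Int), 1 ≤ k →
      pvAGo (PySem.Set.ofList cells) length horizontal cls k =
        (cls.filter (pvHit cells)).isEmpty := by
  intro cls
  induction cls with
  | nil => intro k _; simp [pvAGo]
  | cons cl rest ih =>
    intro k hk
    obtain ⟨comp, orient⟩ := cl
    rw [pvAGo]
    rw [pvInter_isEmpty cells (comp, orient)]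
    by_cases hh : pvHit cells (comp, orient)
    · rw [show ((comp,orient)::rest).filter (pvHit cells)
          = (comp,orient) :: rest.filter (pvHit cells) from by simp [hh]]
      simp only [List.isEmpty_cons, hh, Bool.not_true]
      split_ifs <;> simp_all <;> omega
    · simp only [Bool.not_eq_true] at hh
      rw [show ((comp,orient)::rest).filter (pvHit cells)
          = rest.filter (pvHit cells) from by simp [hh]]
      simp only [hh, Bool.not_false, if_pos]
      exact ih k hk

-- A's loop, characterised by the list of intersected clusters
lemma pvAGo_zero (cells : List (Int × Int)) (length : Int) (horizontal : Bool) :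
    ∀ (cls : List ((List (Int × Int)) × Option String)),
      pvAGo (PySem.Set.ofList cells) length horizontal cls 0 =
        match cls.filter (pvHit cells) with
        | [] => true
        | [h] => pvOk cells length horizontal h
        | _ => false := by
  intro cls
  induction cls with
  | nil => simp [pvAGo]
  | cons cl rest ih =>
    obtain ⟨comp, orient⟩ := cl
    rw [pvAGo, pvInter_isEmpty cells (comp, orient)]
    by_cases hh : pvHit cells (comp, orient)
    · rw [show ((comp,orient)::rest).filter (pvHit cells)
          = (comp,orient) :: rest.filter (pvHit cells) from by simp [hh]]
      simp only [hh, Bool.not_true]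
      rw [show ((0:Int) + 1) = 1 from rfl]
      rw [pvAGo_pos cells length horizontal rest 1 (by omega)]
      cases hrest : rest.filter (pvHit cells) with
      | nil =>
        simp only [hrest, List.isEmpty_nil, pvOk]
        split_ifs <;> simp_all
      | cons a t =>
        simp only [hrest, List.isEmpty_cons]
        split_ifs <;> simp_all
    · simp only [Bool.not_eq_true] at hh
      rw [show ((comp,orient)::rest).filter (pvHit cells)
          = rest.filter (pvHit cells) from by simp [hh]]
      simp only [hh, Bool.not_false, if_pos]
      exact ih

-- membership in B's inner fold (one placement cell against all enumerated clusters)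
lemma pvMem_inner (cell : Int × Int) (prs : List (Int × ((List (Int × Int)) × Option String))) :
    ∀ (acc : PySem.Set Int) (i : Int),
      i ∈ prs.foldl (fun acc2 icl =>
          if icl.2.1.contains cell then PySem.Set.add acc2 icl.1 else acc2) acc ↔
        i ∈ acc ∨ ∃ pr ∈ prs, pr.2.1.contains cell ∧ pr.1 = i := by
  induction prs with
  | nil => simp
  | cons pr rest ih =>
    intro acc i
    simp only [List.foldl_cons]
    by_cases hp : pr.2.1.contains cell
    · rw [if_pos hp, ih]
      simp only [PySem.Set.mem_add]
      constructor
      · rintro (⟨h | h⟩ | ⟨q, hq, hc, he⟩)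
        · exact Or.inl h
        · exact Or.inr ⟨pr, by simp, hp, h.symm⟩
        · exact Or.inr ⟨q, by simp [hq], hc, he⟩
      · rintro (h | ⟨q, hq, hc, he⟩)
        · exact Or.inl (Or.inl h)
        · rcases List.mem_cons.mp hq with h | h
          · subst h; exact Or.inl (Or.inr he.symm)
          · exact Or.inr ⟨q, h, hc, he⟩
    · rw [if_neg hp, ih]
      constructor
      · rintro (h | ⟨q, hq, hc, he⟩)
        · exact Or.inl h
        · exact Or.inr ⟨q, by simp [hq], hc, he⟩
      · rintro (h | ⟨q, hq, hc, he⟩)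
        · exact Or.inl h
        · rcases List.mem_cons.mp hq with h | h
          · subst h; exact absurd hc hp
          · exact Or.inr ⟨q, h, hc, he⟩

lemma pvNodup_inner (cell : Int × Int) (prs : List (Int × ((List (Int × Int)) × Option String))) :
    ∀ (acc : PySem.Set Int), acc.Nodup →
      (prs.foldl (fun acc2 icl =>
          if icl.2.1.contains cell then PySem.Set.add acc2 icl.1 else acc2) acc).Nodup := by
  induction prs with
  | nil => intro acc h; exact h
  | cons pr rest ih =>
    intro acc h
    simp only [List.foldl_cons]
    by_cases hp : pr.2.1.contains cell
    · rw [if_pos hp]; exact ih _ (PySem.Set.nodup_add _ _ h)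
    · rw [if_neg hp]; exact ih _ h

-- membership in B's touched set: exactly the enumerated indices of intersected clusters
lemma pvMem_touched (cells : List (Int × Int)) (clusters : List ((List (Int × Int)) × Option String)) :
    ∀ (acc : PySem.Set Int) (i : Int),
      i ∈ cells.foldl (fun acc cell =>
          (PySem.List.enumerate clusters).foldl (fun acc2 icl =>
            if icl.2.1.contains cell then PySem.Set.add acc2 icl.1 else acc2) acc) acc ↔
        i ∈ acc ∨ ∃ pr ∈ PySem.List.enumerate clusters, pvHit cells pr.2 ∧ pr.1 = i := by
  induction cells with
  | nil => simp [pvHit]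
  | cons c rest ih =>
    intro acc i
    simp only [List.foldl_cons]
    rw [ih, pvMem_inner]
    unfold pvHit
    constructor
    · rintro ((h | ⟨q, hq, hc, he⟩) | ⟨q, hq, hh, he⟩)
      · exact Or.inl h
      · refine Or.inr ⟨q, hq, ?_, he⟩
        simp only [List.any_eq_true]
        exact ⟨c, by simpa using hc, by simp⟩
      · refine Or.inr ⟨q, hq, ?_, he⟩
        simp only [List.any_eq_true] at hh ⊢
        obtain ⟨x, hx1, hx2⟩ := hh
        exact ⟨x, hx1, by simp at hx2 ⊢; exact Or.inr hx2⟩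
    · rintro (h | ⟨q, hq, hh, he⟩)
      · exact Or.inl (Or.inl h)
      · simp only [List.any_eq_true] at hh
        obtain ⟨x, hx1, hx2⟩ := hh
        simp only [List.contains_eq_mem, decide_eq_true_eq, List.mem_cons] at hx2
        rcases hx2 with h | h
        · subst h
          exact Or.inl (Or.inr ⟨q, hq, by simpa using hx1, he⟩)
        · exact Or.inr ⟨q, hq, List.any_eq_true.mpr ⟨x, hx1, by simpa using h⟩, he⟩

lemma pvNodup_touched (cells : List (Int × Int)) (clusters : List ((List (Int × Int)) × Option String)) :
    ∀ (acc : PySem.Set Int), acc.Nodup →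
      (cells.foldl (fun acc cell =>
          (PySem.List.enumerate clusters).foldl (fun acc2 icl =>
            if icl.2.1.contains cell then PySem.Set.add acc2 icl.1 else acc2) acc) acc).Nodup := by
  induction cells with
  | nil => intro acc h; exact h
  | cons c rest ih =>
    intro acc h
    simp only [List.foldl_cons]
    exact ih _ (pvNodup_inner _ _ _ h)

-- the canonical index list (indices of intersected clusters, in order) is duplicate-free
lemma pvNodup_canon (cells : List (Int × Int)) (clusters : List ((List (Int × Int)) × Option String)) :
    (((PySem.List.enumerate clusters).filter (fun pr => pvHit cells pr.2)).map (·.1)).Nodup := by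
  have h1 := PySem.List.pairwise_lt_enumerate clusters 0
  have h2 : List.Pairwise (fun p q => p.1 < q.1)
      ((PySem.List.enumerate clusters).filter (fun pr => pvHit cells pr.2)) :=
    h1.sublist (List.filter_sublist)
  have h3 : List.Pairwise (· < ·)
      (((PySem.List.enumerate clusters).filter (fun pr => pvHit cells pr.2)).map (·.1)) :=
    h2.map _ (fun _ _ hab => hab)
  exact h3.imp (fun h => ne_of_lt h)

-- B's touched set is a permutation of the canonical index list
lemma pvTouched_perm (cells : List (Int × Int)) (clusters : List ((List (Int × Int)) × Option String)) :
    (cells.foldl (fun acc cell =>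
        (PySem.List.enumerate clusters).foldl (fun acc2 icl =>
          if icl.2.1.contains cell then PySem.Set.add acc2 icl.1 else acc2) acc) []).Perm
      (((PySem.List.enumerate clusters).filter (fun pr => pvHit cells pr.2)).map (·.1)) := by
  rw [List.perm_ext_iff_of_nodup (pvNodup_touched cells clusters [] (by simp))
      (pvNodup_canon cells clusters)]
  intro i
  rw [pvMem_touched]
  simp only [List.mem_map, List.mem_filter, List.not_mem_nil, false_or]
  constructor
  · rintro ⟨pr, hpr, hh, he⟩; exact ⟨pr, ⟨hpr, hh⟩, he⟩
  · rintro ⟨pr, ⟨hpr, hh⟩, he⟩; exact ⟨pr, hpr, hh, he⟩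

lemma pvCountP_enumerate (clusters : List ((List (Int × Int)) × Option String))
    (p : (List (Int × Int)) × Option String → Bool) :
    ∀ s : Int, ((PySem.List.enumerate clusters s).filter (fun pr => p pr.2)).length =
      (clusters.filter p).length := by
  induction clusters with
  | nil => intro s; simp [PySem.List.enumerate_nil]
  | cons cl rest ih =>
    intro s
    rw [PySem.List.enumerate_cons]
    by_cases hp : p cl
    · simp [hp, ih]
    · simp [hp, ih]

-- |touched| = number of intersected clusters
lemma pvTouched_length (cells : List (Int × Int)) (clusters : List ((List (Int × Int)) × Option String)) :
    (cells.foldl (fun acc cell =>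
        (PySem.List.enumerate clusters).foldl (fun acc2 icl =>
          if icl.2.1.contains cell then PySem.Set.add acc2 icl.1 else acc2) acc) []).length =
      (clusters.filter (pvHit cells)).length := by
  rw [(pvTouched_perm cells clusters).length_eq, List.length_map]
  exact pvCountP_enumerate clusters (pvHit cells) 0

-- ===== VERDICT (by name: the statement is the Claim_ definition above) =====
theorem placement_consistent_with_clusters_py_spec : Claim_equal_placement_consistent_with_clusters_py := by
  intro cells clusters length horizontal _
  unfold Spec_placement_consistent_with_clusters_py
  unfold placement_consistent_with_clusters_py placement_consistent_with_clusters_py_alt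
  rw [pvAGo_zero cells length horizontal clusters]
  have hlen := pvTouched_length cells clusters
  have hmem := pvMem_touched cells clusters []
  cases hf : clusters.filter (pvHit cells) with
  | nil =>
    rw [hf] at hlen
    have hT := List.length_eq_zero_iff.mp hlen
    simp only [hT, List.length_nil]
    norm_num
  | cons h1 t =>
    cases t with
    | nil =>
      rw [hf] at hlen
      obtain ⟨i, hTi⟩ := List.length_eq_one_iff.mp hlen
      have hiT : i ∈ cells.foldl (fun acc cell =>
          (PySem.List.enumerate clusters).foldl (fun acc2 icl =>
            if icl.2.1.contains cell then PySem.Set.add acc2 icl.1 else acc2) acc) [] := by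
        rw [hTi]; exact List.mem_singleton.mpr rfl
      obtain ⟨pr, hpr, hhit, hpri⟩ := ((hmem i).mp hiT).resolve_left (by simp)
      obtain ⟨k, hk, hpe⟩ := (PySem.List.mem_enumerate_iff clusters 0 pr).mp hpr
      subst hpe
      simp only at hhit hpri
      have hik : i = (k : Int) := by omega
      have hget : PySem.List.pyGet? clusters i = some clusters[k] := by
        rw [hik, PySem.List.pyGet?_natCast]
        exact List.getElem?_eq_getElem hk
      have hmemf : clusters[k] ∈ clusters.filter (pvHit cells) :=
        List.mem_filter.mpr ⟨List.getElem_mem hk, hhit⟩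
      rw [hf] at hmemf
      have hck : clusters[k] = h1 := List.mem_singleton.mp hmemf
      simp only [hTi, List.length_cons, List.length_nil]
      norm_num
      rw [hget, hck]
      obtain ⟨comp, orient⟩ := h1
      simp only [pvOk]
      split_ifs <;> simp_all <;> tauto
    | cons h2 t2 =>
      rw [hf] at hlen
      have : 1 < (cells.foldl (fun acc cell =>
          (PySem.List.enumerate clusters).foldl (fun acc2 icl =>
            if icl.2.1.contains cell then PySem.Set.add acc2 icl.1 else acc2) acc) []).length := by
        rw [hlen]; simp
      rw [if_pos (by exact_mod_cast this)]
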